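-- pv_equiv track=rewrite | github.com/jpata/hepaccelerate-cms | tests/hmm/plotting.py | group_samples_datacard
-- ===== SOURCE A (Python) =====
-- def group_samples_datacard(histos, groups):
--     ret = {}
--     grp_list=[]
--     for n,h in histos.items():
--         found_h=0
--         for groupname, groupcontents in groups:
--             if n in groupcontents:
--                 if groupname not in grp_list:
--                     grp_list.append(groupname)
--                     ret[groupname] = []
--                 ret[groupname] += [h]
--                 found_h=1
--             else:
--                 for gc in groupcontents:
--                     if( (gc == n.split('__')[0]) and (n.split('__')[-1]!=gc)):
--                         ext=n.split('__')[1]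
--                         if (groupname+"__"+ext) not in grp_list:
--                             grp_list.append(groupname+"__"+ext)
--                             ret[groupname+"__"+ext]=[]
--                         ret[groupname+"__"+ext] += [h]
--                         found_h=1
--         if found_h==0:
--             if n not in grp_list:
--                 grp_list.append(n)
--                 ret[n]=[]
--             ret[n]+= [h]
--     for gn in grp_list:
--         ret[gn] = sum(ret[gn][1:], ret[gn][0])
--     return ret
-- ===== SOURCE B (Python) =====
-- def group_samples_datacard(histos, groups):
--     # Index every content name once: name -> list of (group position, group name),
--     # one entry per group, in group order.
--     member_of = {}
--     for i, (gname, contents) in enumerate(groups):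
--         for c in contents:
--             entries = member_of.setdefault(c, [])
--             if not entries or entries[-1][0] != i:
--                 entries.append((i, gname))
--     ret = {}
--     for n, h in histos.items():
--         parts = n.split('__')
--         exact = member_of.get(n, [])
--         if parts[0] != parts[-1]:
--             seen = {i for i, _ in exact}
--             prefix = [(i, g + '__' + parts[1])
--                       for i, g in member_of.get(parts[0], []) if i not in seen]
--         else:
--             prefix = []
--         matched = sorted(exact + prefix, key=lambda t: t[0])
--         if not matched:
--             matched = [(0, n)]
--         for _, key in matched:
--             ret[key] = ret.get(key, 0) + h
--     return ret
-- ===== Notes on version B (the rewrite author's own statement) =====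
-- stated objective: faster
-- what changed: Instead of rescanning every group's full content list for every histogram (with a per-element prefix comparison inside), B builds one dict index content-name -> [(group position, group name)] in a single pass over the groups, then resolves each histogram by two direct lookups (its exact name and its '__' prefix) merged in group order, accumulating integer sums directly instead of building per-key lists summed in a final pass.
-- intended difference: On inputs where some group's content list repeats the '__'-prefix of a histogram name and the double-counted contributions do not cancel out of the affected key's sum, A returns that inflated sum (the histogram is added once per duplicated content entry), while B adds each histogram once per matching group, the intended datacard grouping. — e.g. on group_samples_datacard([("a__x", 1)], [("g", ["a", "a"])]): A returns [("g__x", 2)], B returns [("g__x", 1)]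
import Mathlib
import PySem

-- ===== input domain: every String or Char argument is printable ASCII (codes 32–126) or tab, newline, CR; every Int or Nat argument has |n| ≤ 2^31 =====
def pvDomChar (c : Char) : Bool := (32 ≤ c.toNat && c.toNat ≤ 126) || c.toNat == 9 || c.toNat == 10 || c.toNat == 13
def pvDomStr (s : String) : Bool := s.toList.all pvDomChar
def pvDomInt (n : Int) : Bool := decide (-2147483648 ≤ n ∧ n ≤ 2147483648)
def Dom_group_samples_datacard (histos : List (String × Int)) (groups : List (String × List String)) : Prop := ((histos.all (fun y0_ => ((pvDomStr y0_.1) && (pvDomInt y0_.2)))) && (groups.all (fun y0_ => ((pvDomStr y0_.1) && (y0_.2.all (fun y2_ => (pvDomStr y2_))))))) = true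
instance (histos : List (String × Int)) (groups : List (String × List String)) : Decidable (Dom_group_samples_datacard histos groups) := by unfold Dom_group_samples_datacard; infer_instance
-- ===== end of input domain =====

-- B replaces A's full rescan of every group per histogram by a dict index
-- (content name -> list of (group position, group name)) built once, then resolves each
-- histogram by two direct lookups merged in group order; A mutates no argument,
-- so the equivalence is about the return value.

-- ===== PORT A =====
-- n.split('__') (the separator "__" is non-empty, so split? is always some)
def splitA (n : String) : List String := (PySem.Str.split? n "__").getD []

-- the Python block repeated verbatim in A's three branches:
-- 'if key not in grp_list: grp_list.append(key); ret[key]=[]' then 'ret[key] += [h]'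
-- (ret[key] exists at the '+= [h]', so the total getD form is exact)
def pushA (s : PySem.Dict String (List Int) × List String) (k : String) (h : Int) :
    PySem.Dict String (List Int) × List String :=
  let s' := if s.2.contains k then s else (s.1.insert k [], s.2 ++ [k])
  (s'.1.insert k (s'.1.getD k [] ++ [h]), s'.2)

-- body of 'for gc in groupcontents: ...'
def stepGcA (n : String) (h : Int) (gname : String)
    (s : (PySem.Dict String (List Int) × List String) × Int) (gc : String) :
    (PySem.Dict String (List Int) × List String) × Int :=
  if gc == PySem.List.pyGetD (splitA n) 0 ""
     && !(PySem.List.pyGetD (splitA n) (-1) "" == gc) then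
    (pushA s.1 (gname ++ "__" ++ PySem.List.pyGetD (splitA n) 1 "") h, 1)
  else s

-- body of 'for groupname, groupcontents in groups: ...' (state carries found_h)
def stepGroupA (n : String) (h : Int)
    (s : (PySem.Dict String (List Int) × List String) × Int) (g : String × List String) :
    (PySem.Dict String (List Int) × List String) × Int :=
  if g.2.contains n then (pushA s.1 g.1 h, 1)
  else g.2.foldl (stepGcA n h g.1) s

-- body of 'for n,h in histos.items(): ...'
def stepHistoA (groups : List (String × List String))
    (st : PySem.Dict String (List Int) × List String) (nh : String × Int) :
    PySem.Dict String (List Int) × List String :=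
  let inner := groups.foldl (stepGroupA nh.1 nh.2) (st, (0 : Int))
  if inner.2 == 0 then pushA inner.1 nh.1 nh.2 else inner.1

-- sum(l[1:], l[0]) (l is non-empty whenever A evaluates this; pyGetD is its total form)
def sumA (l : List Int) : Int :=
  (PySem.List.slice l (some 1) none).foldl (· + ·) (PySem.List.pyGetD l 0 0)

def group_samples_datacard (histos : List (String × Int)) (groups : List (String × List String)) : List (String × Int) :=
  let res := histos.foldl (stepHistoA groups) (PySem.Dict.empty, [])
  -- final pass 'for gn in grp_list: ret[gn] = sum(...)': values change in place, the key order of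
  -- ret stays grp_list (its insertion order), so rebuilding along grp_list is exact
  (res.2.foldl (fun (d : PySem.Dict String Int) gn =>
    d.insert gn (sumA (res.1.getD gn []))) PySem.Dict.empty).items

-- ===== PORT B =====
-- 'entries = member_of.setdefault(c, []); if not entries or entries[-1][0] != i: entries.append((i, gname))'
-- (the setdefault's fresh empty list is always appended to at once, so the getD form is exact)
def addMember (i : Int) (gname : String) (m : PySem.Dict String (List (Int × String)))
    (c : String) : PySem.Dict String (List (Int × String)) :=
  let l := m.getD c []
  if l.isEmpty || l.getLast?.any (fun e => e.1 != i) then m.insert c (l ++ [(i, gname)]) else m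

-- 'for i, (gname, contents) in enumerate(groups): for c in contents: ...'
def buildIndexB (groups : List (String × List String)) : PySem.Dict String (List (Int × String)) :=
  (PySem.List.enumerate groups).foldl
    (fun m pg => pg.2.2.foldl (addMember pg.1 pg.2.1) m) PySem.Dict.empty

-- body of 'for n, h in histos.items(): ...'
def stepHistoB (index : PySem.Dict String (List (Int × String)))
    (d : PySem.Dict String Int) (nh : String × Int) : PySem.Dict String Int :=
  let n := nh.1; let h := nh.2
  let parts := (PySem.Str.split? n "__").getD []   -- n.split('__'), separator non-empty
  let exact := index.getD n []
  let pre := if PySem.List.pyGetD parts 0 "" ≠ PySem.List.pyGetD parts (-1) "" then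
      let seen := PySem.Set.ofList (exact.map (·.1))
      ((index.getD (PySem.List.pyGetD parts 0 "") []).filter
        (fun e => !(PySem.Set.contains seen e.1))).map
        (fun e => (e.1, e.2 ++ "__" ++ PySem.List.pyGetD parts 1 ""))
    else []
  let matched := PySem.List.sorted (exact ++ pre) (fun e => e.1) false
  let matched := if matched.isEmpty then [((0 : Int), n)] else matched
  matched.foldl (fun (d : PySem.Dict String Int) e => d.insert e.2 (d.getD e.2 0 + h)) d

def group_samples_datacard_alt (histos : List (String × Int)) (groups : List (String × List String)) : List (String × Int) :=
  (histos.foldl (stepHistoB (buildIndexB groups)) PySem.Dict.empty).items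

-- ===== PRECONDITION & SPEC =====
-- Pre_ encodes that 'histos' is a Python dict: its keys are pairwise distinct (a duplicate-key
-- association list is not representable as the dict A receives).
def Pre_group_samples_datacard (histos : List (String × Int)) (groups : List (String × List String)) : Prop :=
  (histos.map Prod.fst).Nodup
instance (histos : List (String × Int)) (groups : List (String × List String)) : Decidable (Pre_group_samples_datacard histos groups) := by unfold Pre_group_samples_datacard; infer_instance

def pvWitness_group_samples_datacard : (List (String × Int)) × (List (String × List String)) :=
  ([("dy__nominal", 3), ("wz", 2)], [("bkg", ["dy", "wz"])])

-- On inputs where some group's content list repeats the '__'-prefix of a histogram name and the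
-- resulting double-counted contributions do not cancel out of the affected key's sum, A returns
-- that inflated sum (the histogram is added once per duplicated content entry), while B adds each
-- histogram once per matching group, the intended datacard grouping.
-- the i-th '__'-piece of a histogram name (a shape property of the input)
def dP (n : String) (i : Int) : String :=
  PySem.List.pyGetD ((PySem.Chars.splitOn n.toList ['_', '_']).map String.ofList) i ""
-- the amount by which duplicated prefix entries of group g inflate histogram nh's contribution
def dAmt (nh : String × Int) (g : String × List String) : Int :=
  if g.2.contains nh.1 || dP nh.1 (-1) == dP nh.1 0 then 0
  else ((g.2.count (dP nh.1 0) - 1 : Nat) : Int) * nh.2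
def D_group_samples_datacard (histos : List (String × Int)) (groups : List (String × List String)) : Prop :=
  -- the inflated (key, amount) pairs with a nonzero amount (empty unless a group repeats a prefix)
  let L := (histos.flatMap (fun nh =>
    groups.map (fun g => (g.1 ++ "__" ++ dP nh.1 1, dAmt nh g)))).filter (·.2 != 0)
  ∃ p ∈ L, ((L.filter (·.1 == p.1)).map (·.2)).sum ≠ 0
instance (histos : List (String × Int)) (groups : List (String × List String)) : Decidable (D_group_samples_datacard histos groups) := by unfold D_group_samples_datacard; infer_instance

def Spec_group_samples_datacard (histos : List (String × Int)) (groups : List (String × List String)) (out : List (String × Int)) : Prop := ¬ D_group_samples_datacard histos groups → out = group_samples_datacard_alt histos groups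
instance (histos : List (String × Int)) (groups : List (String × List String)) (out : List (String × Int)) : Decidable (Spec_group_samples_datacard histos groups out) := by unfold Spec_group_samples_datacard; infer_instance

def pvDiffWitness_group_samples_datacard : (List (String × Int)) × (List (String × List String)) :=
  ([("a__x", 1)], [("g", ["a", "a"])])
def pvDiffWitnessOut_group_samples_datacard : (List (String × Int)) × (List (String × Int)) :=
  ([("g__x", 2)], [("g__x", 1)])

-- ===== CLAIM (what is proved, stated in full; the proofs are below) =====
def Claim_unchanged_group_samples_datacard : Prop := ∀ (histos : List (String × Int)) (groups : List (String × List String)), Dom_group_samples_datacard histos groups → Pre_group_samples_datacard histos groups → Spec_group_samples_datacard histos groups (group_samples_datacard histos groups)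
def Claim_changed_group_samples_datacard : Prop := Dom_group_samples_datacard (pvDiffWitness_group_samples_datacard.1) (pvDiffWitness_group_samples_datacard.2) ∧ Pre_group_samples_datacard (pvDiffWitness_group_samples_datacard.1) (pvDiffWitness_group_samples_datacard.2) ∧ D_group_samples_datacard (pvDiffWitness_group_samples_datacard.1) (pvDiffWitness_group_samples_datacard.2) ∧ group_samples_datacard (pvDiffWitness_group_samples_datacard.1) (pvDiffWitness_group_samples_datacard.2) = pvDiffWitnessOut_group_samples_datacard.1 ∧ group_samples_datacard_alt (pvDiffWitness_group_samples_datacard.1) (pvDiffWitness_group_samples_datacard.2) = pvDiffWitnessOut_group_samples_datacard.2 ∧ pvDiffWitnessOut_group_samples_datacard.1 ≠ pvDiffWitnessOut_group_samples_datacard.2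
def Claim_exact_group_samples_datacard : Prop := ∀ (histos : List (String × Int)) (groups : List (String × List String)), Dom_group_samples_datacard histos groups → Pre_group_samples_datacard histos groups → D_group_samples_datacard histos groups → group_samples_datacard histos groups ≠ group_samples_datacard_alt histos groups

-- ===== LEMMAS AND PROOFS =====

-- ---- spec-level description shared by both ports: per-histogram contribution schedules ----

-- n.split('__')[0], [-1], [1]
def p0A (n : String) : String := PySem.List.pyGetD (splitA n) 0 ""
def plA (n : String) : String := PySem.List.pyGetD (splitA n) (-1) ""
def extA (n : String) : String := PySem.List.pyGetD (splitA n) 1 ""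

-- A's per-content-element test
def qA (p0 pl : String) (gc : String) : Bool := gc == p0 && !(pl == gc)

-- per-(histogram, group, key) inflation, and its total per key (proof-level view of dNZ)
def dPair (nh : String × Int) (g : String × List String) (k : String) : Int :=
  if !(g.2.contains nh.1) && (g.1 ++ "__" ++ extA nh.1 == k) then
    max (((g.2.filter (qA (p0A nh.1) (plA nh.1))).length : Int) - 1) 0 * nh.2
  else 0
def dAt (histos : List (String × Int)) (groups : List (String × List String)) (k : String) : Int :=
  (histos.map (fun nh => (groups.map (fun g => dPair nh g k)).sum)).sum

theorem dP_eq (n : String) (i : Int) : dP n i = PySem.List.pyGetD (splitA n) i "" := by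
  unfold dP splitA
  have h := PySem.Str.split?_map n "__"
  rw [show ("__" : String).toList = ['_', '_'] from rfl] at h
  have h2 : PySem.Chars.split? n.toList ['_', '_']
      = some (PySem.Chars.splitOn n.toList ['_', '_']) := by
    simp [PySem.Chars.split?]
  rw [h2] at h
  cases hs : PySem.Str.split? n "__" with
  | none => rw [hs] at h; exact absurd h (by simp)
  | some l =>
    rw [hs] at h
    simp only [Option.map_some, Option.some.injEq] at h
    have h3 : (PySem.Chars.splitOn n.toList ['_', '_']).map String.ofList
        = (l.map String.toList).map String.ofList := by rw [h]
    rw [h3, List.map_map]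
    have hco : (String.ofList ∘ String.toList) = id := by
      funext x; simp
    rw [hco, List.map_id]
    rfl

theorem filter_qA (p0 pl : String) (cs : List String) :
    cs.filter (qA p0 pl) = if pl == p0 then [] else cs.filter (· == p0) := by
  by_cases hpl : (pl == p0) = true
  · rw [if_pos hpl]
    apply List.filter_eq_nil_iff.2
    intro gc _
    unfold qA
    by_cases hg : (gc == p0) = true
    · have he : gc = p0 := by simpa using hg
      subst he
      simp [hpl]
    · simp [hg]
  · rw [if_neg hpl]
    apply List.filter_congr
    intro gc _
    unfold qA
    by_cases hg : (gc == p0) = true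
    · have he : gc = p0 := by simpa using hg
      subst he
      simp_all
    · simp [hg]


-- contributions of one group for histogram (n, h), as A produces them (one pair per push)
def gA (n : String) (h : Int) (p0 pl ext : String) (g : String × List String) : List (String × Int) :=
  if g.2.contains n then [(g.1, h)]
  else (g.2.filter (qA p0 pl)).map (fun _ => (g.1 ++ "__" ++ ext, h))

-- contributions of one group as B produces them (at most one pair per group)
def gB (n : String) (h : Int) (p0 pl ext : String) (g : String × List String) : List (String × Int) :=
  if g.2.contains n then [(g.1, h)]
  else if !(pl == p0) && g.2.contains p0 then [(g.1 ++ "__" ++ ext, h)]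
  else []

def EA (n : String) (h : Int) (p0 pl ext : String) (groups : List (String × List String)) : List (String × Int) :=
  groups.flatMap (gA n h p0 pl ext)
def EB (n : String) (h : Int) (p0 pl ext : String) (groups : List (String × List String)) : List (String × Int) :=
  groups.flatMap (gB n h p0 pl ext)

def padA (n : String) (h : Int) (p0 pl ext : String) (groups : List (String × List String)) : List (String × Int) :=
  if EA n h p0 pl ext groups = [] then [(n, h)] else EA n h p0 pl ext groups
def padB (n : String) (h : Int) (p0 pl ext : String) (groups : List (String × List String)) : List (String × Int) :=
  if EB n h p0 pl ext groups = [] then [(n, h)] else EB n h p0 pl ext groups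

def histPairsA (groups : List (String × List String)) (nh : String × Int) : List (String × Int) :=
  padA nh.1 nh.2 (p0A nh.1) (plA nh.1) (extA nh.1) groups
def histPairsB (groups : List (String × List String)) (nh : String × Int) : List (String × Int) :=
  padB nh.1 nh.2 (p0A nh.1) (plA nh.1) (extA nh.1) groups

def foldPush (s : PySem.Dict String (List Int) × List String) (l : List (String × Int)) :
    PySem.Dict String (List Int) × List String :=
  l.foldl (fun s p => pushA s p.1 p.2) s

def insertAdd (d : PySem.Dict String Int) (p : String × Int) : PySem.Dict String Int :=
  d.insert p.1 (d.getD p.1 0 + p.2)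

-- invariant of A's state: keys absent from grp_list have no (empty) list in ret
def InvA (s : PySem.Dict String (List Int) × List String) : Prop :=
  ∀ x, s.2.contains x = false → s.1.getD x [] = []

theorem pushA_grp (s : PySem.Dict String (List Int) × List String) (k : String) (h : Int) :
    (pushA s k h).2 = PySem.Set.add s.2 k := by
  unfold pushA PySem.Set.add PySem.Set.contains
  by_cases hc : s.2.contains k = true
  · rw [if_pos hc, if_pos hc]
  · rw [if_neg hc, if_neg hc]

theorem pushA_getD (s : PySem.Dict String (List Int) × List String) (k : String) (h : Int)
    (hinv : InvA s) (x : String) :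
    (pushA s k h).1.getD x [] = if x = k then s.1.getD x [] ++ [h] else s.1.getD x [] := by
  unfold pushA
  by_cases hc : s.2.contains k = true
  · rw [if_pos hc]
    dsimp only
    rw [PySem.Dict.getD_insert]
    by_cases hx : x = k
    · rw [if_pos hx, if_pos hx]; subst hx; rfl
    · rw [if_neg hx, if_neg hx]
  · rw [if_neg hc]
    have hk0 : s.1.getD k [] = [] := hinv k (by simpa using hc)
    dsimp only
    rw [PySem.Dict.getD_insert]
    by_cases hx : x = k
    · rw [if_pos hx, if_pos hx]; subst hx
      rw [PySem.Dict.getD_insert, if_pos rfl, hk0]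
    · rw [if_neg hx, if_neg hx, PySem.Dict.getD_insert, if_neg hx]

theorem pushA_inv (s : PySem.Dict String (List Int) × List String) (k : String) (h : Int)
    (hinv : InvA s) : InvA (pushA s k h) := by
  intro x hx
  rw [pushA_grp] at hx
  have hmem : x ∉ PySem.Set.add s.2 k := by
    intro hm
    have hm' := List.contains_iff_mem.2 hm
    rw [hm'] at hx
    exact Bool.noConfusion hx
  have hxk : x ≠ k := fun he => hmem ((PySem.Set.mem_add s.2 k x).2 (Or.inr he))
  have hxs : s.2.contains x = false := by
    cases hb : s.2.contains x with
    | false => rfl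
    | true => exact absurd ((PySem.Set.mem_add s.2 k x).2 (Or.inl (List.contains_iff_mem.1 hb))) hmem
  rw [pushA_getD s k h hinv x, if_neg hxk]
  exact hinv x hxs

theorem foldPush_spec (l : List (String × Int)) :
    ∀ s, InvA s → InvA (foldPush s l) ∧
      (foldPush s l).2 = (l.map (·.1)).foldl PySem.Set.add s.2 ∧
      ∀ x, (foldPush s l).1.getD x [] =
        s.1.getD x [] ++ (l.filter (fun p => p.1 == x)).map (·.2) := by
  induction l with
  | nil => intro s hs; exact ⟨hs, rfl, fun x => by simp [foldPush]⟩
  | cons p t ih =>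
    intro s hs
    have hstep : foldPush s (p :: t) = foldPush (pushA s p.1 p.2) t := rfl
    have hinv' := pushA_inv s p.1 p.2 hs
    obtain ⟨h1, h2, h3⟩ := ih (pushA s p.1 p.2) hinv'
    refine ⟨by rw [hstep]; exact h1, ?_, ?_⟩
    · rw [hstep, h2, List.map_cons, List.foldl_cons, pushA_grp]
    · intro x
      rw [hstep, h3 x, pushA_getD s p.1 p.2 hs x]
      by_cases hx : p.1 = x
      · rw [List.filter_cons_of_pos (by simpa using hx), if_pos hx.symm]
        simp
      · rw [List.filter_cons_of_neg (by simpa using hx), if_neg (fun he => hx he.symm)]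

theorem foldPush_append (s : PySem.Dict String (List Int) × List String) (l l' : List (String × Int)) :
    foldPush s (l ++ l') = foldPush (foldPush s l) l' := by
  unfold foldPush; exact List.foldl_append

theorem stepGcA_eq (n : String) (h : Int) (gname : String)
    (s : (PySem.Dict String (List Int) × List String) × Int) (gc : String) :
    stepGcA n h gname s gc =
      if qA (p0A n) (plA n) gc then (pushA s.1 (gname ++ "__" ++ extA n) h, 1) else s := rfl

theorem stepGroupA_eq (n : String) (h : Int)
    (s : (PySem.Dict String (List Int) × List String) × Int) (g : String × List String) :
    stepGroupA n h s g =
      if g.2.contains n then (pushA s.1 g.1 h, 1) else g.2.foldl (stepGcA n h g.1) s := rfl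

theorem stepGc_fold (n : String) (h : Int) (gname : String) (cs : List String) :
    ∀ s f, cs.foldl (stepGcA n h gname) (s, f) =
      (foldPush s ((cs.filter (qA (p0A n) (plA n))).map (fun _ => (gname ++ "__" ++ extA n, h))),
       if cs.filter (qA (p0A n) (plA n)) = [] then f else 1) := by
  induction cs with
  | nil => intro s f; simp [foldPush]
  | cons c cs ih =>
    intro s f
    rw [List.foldl_cons, stepGcA_eq]
    by_cases hq : qA (p0A n) (plA n) c = true
    · rw [if_pos hq, ih, List.filter_cons_of_pos hq, List.map_cons]
      refine Prod.ext ?_ ?_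
      · rfl
      · simp
    · rw [if_neg hq, ih, List.filter_cons_of_neg hq]

theorem stepGroup_fold (n : String) (h : Int) (groups : List (String × List String)) :
    ∀ s f, groups.foldl (stepGroupA n h) (s, f) =
      (foldPush s (EA n h (p0A n) (plA n) (extA n) groups),
       if EA n h (p0A n) (plA n) (extA n) groups = [] then f else 1) := by
  induction groups with
  | nil => intro s f; simp [foldPush, EA]
  | cons g t ih =>
    intro s f
    rw [List.foldl_cons, stepGroupA_eq]
    have hEA : EA n h (p0A n) (plA n) (extA n) (g :: t)
        = gA n h (p0A n) (plA n) (extA n) g ++ EA n h (p0A n) (plA n) (extA n) t := by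
      unfold EA; rw [List.flatMap_cons]
    rw [hEA]
    by_cases hc : g.2.contains n = true
    · rw [if_pos hc, ih]
      have hga : gA n h (p0A n) (plA n) (extA n) g = [(g.1, h)] := by
        unfold gA; rw [if_pos hc]
      rw [hga]
      refine Prod.ext ?_ ?_
      · rfl
      · simp
    · rw [if_neg hc, stepGc_fold, ih]
      have hga : gA n h (p0A n) (plA n) (extA n) g
          = (g.2.filter (qA (p0A n) (plA n))).map (fun _ => (g.1 ++ "__" ++ extA n, h)) := by
        unfold gA; rw [if_neg hc]
      rw [hga]
      refine Prod.ext ?_ ?_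
      · exact (foldPush_append _ _ _).symm
      · by_cases h1 : g.2.filter (qA (p0A n) (plA n)) = [] <;>
          by_cases h2 : EA n h (p0A n) (plA n) (extA n) t = [] <;>
          simp [h1, h2]

theorem stepHistoA_eq (groups : List (String × List String))
    (st : PySem.Dict String (List Int) × List String) (nh : String × Int) :
    stepHistoA groups st nh = foldPush st (histPairsA groups nh) := by
  unfold stepHistoA histPairsA padA
  rw [stepGroup_fold nh.1 nh.2 groups st 0]
  by_cases hE : EA nh.1 nh.2 (p0A nh.1) (plA nh.1) (extA nh.1) groups = []
  · rw [if_pos hE, hE]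
    simp [foldPush]
  · rw [if_neg hE, if_neg hE]
    simp

theorem foldA_flat (groups : List (String × List String)) (hs : List (String × Int)) :
    ∀ s, hs.foldl (stepHistoA groups) s = foldPush s (hs.flatMap (histPairsA groups)) := by
  induction hs with
  | nil => intro s; rfl
  | cons nh t ih =>
    intro s
    rw [List.foldl_cons, stepHistoA_eq, ih, List.flatMap_cons, foldPush_append]

theorem foldl_add_int (a : Int) (t : List Int) : t.foldl (· + ·) a = a + t.sum := by
  induction t generalizing a with
  | nil => simp
  | cons x t ih => rw [List.foldl_cons, ih, List.sum_cons, add_assoc]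

theorem sumA_eq_sum (l : List Int) (hne : l ≠ []) : sumA l = l.sum := by
  match l with
  | [] => exact absurd rfl hne
  | a :: t =>
    unfold sumA
    rw [PySem.List.slice_from _ (by norm_num : (0:Int) ≤ 1)]
    have h0 : PySem.List.pyGetD (a :: t) 0 0 = a := by simp
    rw [h0]
    show List.foldl (· + ·) a (List.drop (Int.toNat 1) (a :: t)) = (a :: t).sum
    rw [show List.drop (Int.toNat 1) (a :: t) = t from rfl, foldl_add_int, List.sum_cons]

theorem A_items (histos : List (String × Int)) (groups : List (String × List String)) :
    group_samples_datacard histos groups =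
      (PySem.Set.ofList ((histos.flatMap (histPairsA groups)).map (·.1))).map
        (fun k => (k, sumA (((histos.flatMap (histPairsA groups)).filter (fun p => p.1 == k)).map (·.2)))) := by
  unfold group_samples_datacard
  rw [foldA_flat]
  have hinv0 : InvA (PySem.Dict.empty, []) := fun x _ => PySem.Dict.getD_empty x []
  obtain ⟨_, h2, h3⟩ := foldPush_spec (histos.flatMap (histPairsA groups)) _ hinv0
  set res := foldPush (PySem.Dict.empty, []) (histos.flatMap (histPairsA groups)) with hres
  have h2' : res.2 = PySem.Set.ofList ((histos.flatMap (histPairsA groups)).map (·.1)) := by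
    rw [h2, PySem.Set.ofList_eq_foldl]
  have hitems := PySem.Dict.items_foldl_insert_fresh res.2 (fun a => a)
      (fun gn => sumA (res.1.getD gn [])) PySem.Dict.empty
      (fun a _ => PySem.Dict.contains_empty a)
      (by simp only [List.map_id']; rw [h2']; exact PySem.Set.nodup_ofList _)
  rw [hitems]
  have hempty : (PySem.Dict.empty : PySem.Dict String Int).items = [] := rfl
  rw [hempty, List.nil_append, h2']
  apply List.map_congr_left
  intro gn _
  dsimp only
  rw [h3 gn, PySem.Dict.getD_empty, List.nil_append]

-- ---- B-side lemmas ----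

theorem foldl_op_flatMap {α β γ : Type} (l : List α) (f : α → List β) (op : γ → β → γ) (i : γ) :
    l.foldl (fun a x => (f x).foldl op a) i = (l.flatMap f).foldl op i := by
  induction l generalizing i with
  | nil => rfl
  | cons a t ih => rw [List.foldl_cons, List.flatMap_cons, List.foldl_append, ih]

theorem flatMap_congr_mem {α β : Type} (l : List α) (f g : α → List β)
    (h : ∀ x ∈ l, f x = g x) : l.flatMap f = l.flatMap g := by
  induction l with
  | nil => rfl
  | cons a t ih =>
    rw [List.flatMap_cons, List.flatMap_cons, h a (List.mem_cons_self),
      ih (fun x hx => h x (List.mem_cons_of_mem a hx))]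

theorem filter_flatMap_comm {α β : Type} (l : List α) (f : α → List β) (q : β → Bool) :
    (l.flatMap f).filter q = l.flatMap (fun a => (f a).filter q) := by
  induction l with
  | nil => rfl
  | cons a t ih => rw [List.flatMap_cons, List.flatMap_cons, List.filter_append, ih]

-- the index entry of one enumerated group for a name x
def mOfB (x : String) (pg : Int × String × List String) : List (Int × String) :=
  if pg.2.2.contains x then [(pg.1, pg.2.1)] else []

theorem addMember_getD_ne (i : Int) (g : String) (m : PySem.Dict String (List (Int × String)))
    (c x : String) (hne : c ≠ x) : (addMember i g m c).getD x [] = m.getD x [] := by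
  unfold addMember
  by_cases hc : ((m.getD c []).isEmpty || (m.getD c []).getLast?.any (fun e => e.1 != i)) = true
  · rw [if_pos hc]
    rw [PySem.Dict.getD_insert, if_neg (fun he => hne he.symm)]
  · rw [if_neg hc]

theorem inner_stay (i : Int) (g : String) (x : String) (e0 : Int × String) (hi : e0.1 = i) :
    ∀ (cs : List String) (m : PySem.Dict String (List (Int × String))),
      (m.getD x []).getLast? = some e0 →
      (cs.foldl (addMember i g) m).getD x [] = m.getD x [] := by
  intro cs
  induction cs with
  | nil => intro m _; rfl
  | cons c t ih =>
    intro m hlast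
    rw [List.foldl_cons]
    by_cases hcx : c = x
    · subst hcx
      have hstep : addMember i g m c = m := by
        unfold addMember
        rw [if_neg ?_]
        have hne : (m.getD c []).isEmpty = false := by
          cases hl : m.getD c [] with
          | nil => rw [hl] at hlast; exact absurd hlast (by simp)
          | cons a t => rfl
        rw [hne, hlast]
        simp [hi]
      rw [hstep, ih m hlast]
    · have hstep := addMember_getD_ne i g m c x hcx
      rw [ih (addMember i g m c) (by rw [hstep]; exact hlast), hstep]

theorem inner_main (i : Int) (g : String) (x : String) :
    ∀ (cs : List String) (m : PySem.Dict String (List (Int × String))),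
      (∀ e ∈ m.getD x [], e.1 ≠ i) →
      (cs.foldl (addMember i g) m).getD x [] =
        m.getD x [] ++ (if cs.contains x then [(i, g)] else []) := by
  intro cs
  induction cs with
  | nil => intro m _; simp
  | cons c t ih =>
    intro m hm
    rw [List.foldl_cons]
    by_cases hcx : c = x
    · subst hcx
      have hcond : ((m.getD c []).isEmpty || (m.getD c []).getLast?.any (fun e => e.1 != i)) = true := by
        cases hl : m.getD c [] with
        | nil => rfl
        | cons a tl =>
          apply Bool.or_eq_true_iff.2
          right
          have hlast : (a :: tl).getLast? = some ((a :: tl).getLast (by simp)) := by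
            rw [List.getLast?_eq_getLast]
          rw [hlast]
          have hmem : (a :: tl).getLast (by simp) ∈ m.getD c [] := by
            rw [hl]; exact List.getLast_mem _
          have := hm _ hmem
          simpa using this
      have hstep : addMember i g m c = m.insert c (m.getD c [] ++ [(i, g)]) := by
        unfold addMember; rw [if_pos hcond]
      rw [hstep]
      have hget : (m.insert c (m.getD c [] ++ [(i, g)])).getD c [] = m.getD c [] ++ [(i, g)] := by
        rw [PySem.Dict.getD_insert, if_pos rfl]
      have hlast2 : ((m.insert c (m.getD c [] ++ [(i, g)])).getD c []).getLast? = some (i, g) := by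
        rw [hget]; simp
      rw [inner_stay i g c (i, g) rfl t _ hlast2, hget]
      simp
    · have hstep := addMember_getD_ne i g m c x hcx
      rw [ih (addMember i g m c) (by rw [hstep]; exact hm), hstep]
      have hcc : (c :: t).contains x = t.contains x := by
        simp [List.contains_cons, beq_eq_false_iff_ne.2 hcx, hcx]
        intro h; exact absurd h.symm hcx
      rw [hcc]

theorem outer_build (x : String) :
    ∀ (l : List (Int × String × List String)) (m : PySem.Dict String (List (Int × String))),
      (∀ e ∈ m.getD x [], ∀ pg ∈ l, e.1 < pg.1) →
      l.Pairwise (fun a b => a.1 < b.1) →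
      (l.foldl (fun m pg => pg.2.2.foldl (addMember pg.1 pg.2.1) m) m).getD x [] =
        m.getD x [] ++ l.flatMap (mOfB x) := by
  intro l
  induction l with
  | nil => intro m _ _; simp
  | cons pg t ih =>
    intro m hlt hpw
    rw [List.foldl_cons, List.flatMap_cons]
    rw [List.pairwise_cons] at hpw
    have h1 : (pg.2.2.foldl (addMember pg.1 pg.2.1) m).getD x []
        = m.getD x [] ++ mOfB x pg := by
      rw [inner_main pg.1 pg.2.1 x pg.2.2 m
        (fun e he => ne_of_lt (hlt e he pg (List.mem_cons_self)))]
      unfold mOfB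
      by_cases hc : pg.2.2.contains x = true
      · rfl
      · rfl
    rw [ih _ ?_ hpw.2, h1, List.append_assoc]
    intro e he pg' hpg'
    rw [h1] at he
    rcases List.mem_append.1 he with h | h
    · exact hlt e h pg' (List.mem_cons_of_mem pg hpg')
    · unfold mOfB at h
      by_cases hc : pg.2.2.contains x = true
      · rw [if_pos hc] at h
        have : e = (pg.1, pg.2.1) := by simpa using h
        rw [this]
        exact hpw.1 pg' hpg'
      · rw [if_neg hc] at h
        exact absurd h (List.not_mem_nil)

theorem getD_buildIndex (groups : List (String × List String)) (x : String) :
    (buildIndexB groups).getD x [] = (PySem.List.enumerate groups).flatMap (mOfB x) := by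
  unfold buildIndexB
  rw [outer_build x (PySem.List.enumerate groups) PySem.Dict.empty
    (fun e he => by rw [PySem.Dict.getD_empty] at he; exact absurd he (List.not_mem_nil))
    (PySem.List.pairwise_lt_enumerate groups 0)]
  rw [PySem.Dict.getD_empty, List.nil_append]

theorem perm_flatMap_append {α β : Type} (l : List α) (f g : α → List β) :
    (l.flatMap fun x => f x ++ g x).Perm (l.flatMap f ++ l.flatMap g) := by
  induction l with
  | nil => simp
  | cons a t ih =>
    simp only [List.flatMap_cons]
    have h1 : ((f a ++ g a) ++ t.flatMap (fun x => f x ++ g x)).Perm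
        ((f a ++ g a) ++ (t.flatMap f ++ t.flatMap g)) := ih.append_left _
    refine h1.trans ?_
    have h2 : ((g a ++ t.flatMap f) ++ t.flatMap g).Perm ((t.flatMap f ++ g a) ++ t.flatMap g) :=
      (List.perm_append_comm).append_right _
    have h3 : (g a ++ (t.flatMap f ++ t.flatMap g)).Perm (t.flatMap f ++ (g a ++ t.flatMap g)) := by
      simpa [List.append_assoc] using h2
    have h4 := h3.append_left (f a)
    simpa [List.append_assoc] using h4

theorem pairwise_flatMap {α β : Type} (l : List α) (f : α → List β) (p : α → Int) (q : β → Int)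
    (hl : l.Pairwise (fun a b => p a < p b)) (hf : ∀ x, ∀ e ∈ f x, q e = p x)
    (h1 : ∀ x, (f x).length ≤ 1) :
    (l.flatMap f).Pairwise (fun a b => q a < q b) := by
  induction l with
  | nil => simp
  | cons a t ih =>
    rw [List.pairwise_cons] at hl
    rw [List.flatMap_cons, List.pairwise_append]
    refine ⟨?_, ih hl.2, ?_⟩
    · rcases hfa : f a with _ | ⟨e, _ | ⟨e2, es⟩⟩
      · simp
      · simp
      · have := h1 a; rw [hfa] at this; simp at this
    · intro e he e' he'
      obtain ⟨x, hx, hex⟩ := List.mem_flatMap.1 he'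
      rw [hf a e he, hf x e' hex]
      exact hl.1 x hx

-- per-group selections of B's per-histogram merge, with positions
def A1B (n : String) (pg : Int × String × List String) : List (Int × String) :=
  if pg.2.2.contains n then [(pg.1, pg.2.1)] else []
def preB (n : String) (pg : Int × String × List String) : List (Int × String) :=
  if !(pg.2.2.contains n) && pg.2.2.contains (p0A n) then [(pg.1, pg.2.1)] else []
def A2B (n : String) (pg : Int × String × List String) : List (Int × String) :=
  if !(pg.2.2.contains n) && pg.2.2.contains (p0A n) then
    [(pg.1, pg.2.1 ++ "__" ++ extA n)]
  else []

theorem expos_eq (groups : List (String × List String)) (n : String) (j : Nat)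
    (hj : j < groups.length) :
    PySem.Set.contains
      (PySem.Set.ofList (((PySem.List.enumerate groups).flatMap (mOfB n)).map (·.1)))
      ((j : Int)) = groups[j].2.contains n := by
  have hiff : ((j : Int) ∈ ((PySem.List.enumerate groups).flatMap (mOfB n)).map (·.1))
      ↔ groups[j].2.contains n = true := by
    constructor
    · intro hm
      obtain ⟨e, he, hke⟩ := List.mem_map.1 hm
      obtain ⟨pg, hpg, hepg⟩ := List.mem_flatMap.1 he
      obtain ⟨i, hi, rfl⟩ := (PySem.List.mem_enumerate_iff groups 0 pg).1 hpg
      unfold mOfB at hepg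
      dsimp only at hepg hke
      by_cases hci : groups[i].2.contains n = true
      · rw [if_pos hci] at hepg
        have he1 : e = ((0 : Int) + i, groups[i].1) := by simpa using hepg
        rw [he1] at hke
        have hij : i = j := by
          have : ((i : Int)) = (j : Int) := by
            have := hke
            dsimp only at this
            omega
          exact_mod_cast this
        subst hij
        exact hci
      · rw [if_neg hci] at hepg
        exact absurd hepg (List.not_mem_nil)
    · intro hc
      apply List.mem_map.2
      refine ⟨((j : Int), groups[j].1), ?_, rfl⟩
      apply List.mem_flatMap.2
      refine ⟨((j : Int), groups[j]), ?_, ?_⟩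
      · exact (PySem.List.mem_enumerate_iff groups 0 _).2 ⟨j, hj, by simp⟩
      · unfold mOfB
        dsimp only
        rw [if_pos hc]
        simp
  cases hb : groups[j].2.contains n with
  | true =>
    exact List.contains_iff_mem.2 ((PySem.Set.mem_ofList _ _).2 (hiff.2 hb))
  | false =>
    cases hs : PySem.Set.contains
        (PySem.Set.ofList (((PySem.List.enumerate groups).flatMap (mOfB n)).map (·.1)))
        ((j : Int)) with
    | false => rfl
    | true =>
      have hm := (PySem.Set.mem_ofList _ _).1 (List.contains_iff_mem.1 hs)
      rw [hiff.1 hm] at hb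
      exact Bool.noConfusion hb

theorem stepHistoB_eq (groups : List (String × List String))
    (d : PySem.Dict String Int) (nh : String × Int) :
    stepHistoB (buildIndexB groups) d nh = (histPairsB groups nh).foldl insertAdd d := by
  obtain ⟨n, h⟩ := nh
  unfold stepHistoB histPairsB padB
  dsimp only
  rw [show ((PySem.Str.split? n "__").getD []) = splitA n from rfl]
  rw [show PySem.List.pyGetD (splitA n) (-1) "" = plA n from rfl,
    show PySem.List.pyGetD (splitA n) 1 "" = extA n from rfl]
  rw [show PySem.List.pyGetD (splitA n) 0 "" = p0A n from rfl]
  rw [getD_buildIndex groups n]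
  have hexact : (PySem.List.enumerate groups).flatMap (mOfB n)
      = (PySem.List.enumerate groups).flatMap (A1B n) := rfl
  have hpair1 : ∀ x : Int × String × List String, ∀ e ∈ A1B n x ++ A2B n x, e.1 = x.1 := by
    intro pg e he
    rcases List.mem_append.1 he with h1 | h2
    · unfold A1B at h1
      by_cases hc : pg.2.2.contains n = true
      · rw [if_pos hc] at h1
        have : e = (pg.1, pg.2.1) := by simpa using h1
        rw [this]
      · rw [if_neg hc] at h1
        exact absurd h1 (List.not_mem_nil)
    · unfold A2B at h2
      by_cases hc2 : (!(pg.2.2.contains n) && pg.2.2.contains (p0A n)) = true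
      · rw [if_pos hc2] at h2
        have : e = (pg.1, pg.2.1 ++ "__" ++ extA n) := by simpa using h2
        rw [this]
      · rw [if_neg hc2] at h2
        exact absurd h2 (List.not_mem_nil)
  have hlen1 : ∀ x : Int × String × List String, (A1B n x ++ A2B n x).length ≤ 1 := by
    intro pg
    unfold A1B A2B
    by_cases hc : pg.2.2.contains n = true
    · have hc' : n ∈ pg.2.2 := List.contains_iff_mem.1 hc
      simp [hc']
    · have hc' : n ∉ pg.2.2 := fun hm => hc (List.contains_iff_mem.2 hm)
      by_cases hcp : pg.2.2.contains (p0A n) = true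
      · have hcp' : p0A n ∈ pg.2.2 := List.contains_iff_mem.1 hcp
        simp [hc', hcp']
      · have hcp' : p0A n ∉ pg.2.2 := fun hm => hcp (List.contains_iff_mem.2 hm)
        simp [hc', hcp']
  have hpairT : ((PySem.List.enumerate groups).flatMap (fun pg => A1B n pg ++ A2B n pg)).Pairwise
      (fun a b => a.1 < b.1) :=
    pairwise_flatMap _ _ (fun pg => pg.1) (fun e => e.1)
      (PySem.List.pairwise_lt_enumerate groups 0) hpair1 hlen1
  by_cases hcond : p0A n ≠ plA n
  · rw [if_pos hcond, getD_buildIndex groups (p0A n)]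
    have hep : ((PySem.List.enumerate groups).flatMap (mOfB (p0A n))).filter
        (fun e => !(PySem.Set.contains
          (PySem.Set.ofList (((PySem.List.enumerate groups).flatMap (mOfB n)).map (·.1))) e.1))
        = (PySem.List.enumerate groups).flatMap (preB n) := by
      rw [filter_flatMap_comm]
      apply flatMap_congr_mem
      intro pg hpg
      obtain ⟨j, hj, rfl⟩ := (PySem.List.mem_enumerate_iff groups 0 pg).1 hpg
      rw [show mOfB (p0A n) ((0 : Int) + (j : Int), groups[j])
            = if groups[j].2.contains (p0A n) then [((0 : Int) + (j : Int), groups[j].1)]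
              else [] from rfl,
        show preB n ((0 : Int) + (j : Int), groups[j])
            = if !(groups[j].2.contains n) && groups[j].2.contains (p0A n) then
                [((0 : Int) + (j : Int), groups[j].1)]
              else [] from rfl]
      have hqj : PySem.Set.contains
          (PySem.Set.ofList (((PySem.List.enumerate groups).flatMap (mOfB n)).map (·.1)))
          ((0 : Int) + (j : Int)) = groups[j].2.contains n := by
        rw [zero_add]
        exact expos_eq groups n j hj
      by_cases hcp : groups[j].2.contains (p0A n) = true
      · rw [if_pos hcp, List.filter_cons, List.filter_nil]
        cases hcn : groups[j].2.contains n with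
        | true =>
          have hnot : (!(PySem.Set.contains
              (PySem.Set.ofList (((PySem.List.enumerate groups).flatMap (mOfB n)).map (·.1)))
              ((0 : Int) + (j : Int)))) = false := by rw [hqj, hcn]; rfl
          rw [if_neg (by dsimp only; rw [hnot]; simp), if_neg (by simp)]
        | false =>
          have hnot : (!(PySem.Set.contains
              (PySem.Set.ofList (((PySem.List.enumerate groups).flatMap (mOfB n)).map (·.1)))
              ((0 : Int) + (j : Int)))) = true := by rw [hqj, hcn]; rfl
          rw [if_pos (by dsimp only; rw [hnot]), if_pos (by rw [hcp]; rfl)]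
      · have hcpf : groups[j].2.contains (p0A n) = false := by
          revert hcp; cases groups[j].2.contains (p0A n) <;> simp
        rw [if_neg hcp, List.filter_nil, if_neg (by rw [hcpf]; simp)]
    rw [hep]
    have hmap2 : ((PySem.List.enumerate groups).flatMap (preB n)).map
        (fun e => (e.1, e.2 ++ "__" ++ extA n))
        = (PySem.List.enumerate groups).flatMap (A2B n) := by
      rw [List.map_flatMap]
      apply flatMap_congr_mem
      intro pg _
      unfold preB A2B
      by_cases hc2 : (!(pg.2.2.contains n) && pg.2.2.contains (p0A n)) = true
      · rw [if_pos hc2, if_pos hc2]; rfl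
      · rw [if_neg hc2, if_neg hc2]; rfl
    rw [hexact, hmap2]
    have hsorted : PySem.List.sorted
        ((PySem.List.enumerate groups).flatMap (A1B n) ++ (PySem.List.enumerate groups).flatMap (A2B n))
        (fun e => e.1) false
        = (PySem.List.enumerate groups).flatMap (fun pg => A1B n pg ++ A2B n pg) :=
      PySem.List.sorted_eq_of_perm_of_pairwise_lt _ _ _
        (perm_flatMap_append (PySem.List.enumerate groups) (A1B n) (A2B n)) hpairT
    rw [hsorted]
    have hmapPair : ((PySem.List.enumerate groups).flatMap (fun pg => A1B n pg ++ A2B n pg)).map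
        (fun e => (e.2, h)) = EB n h (p0A n) (plA n) (extA n) groups := by
      rw [List.map_flatMap]
      unfold EB
      conv_rhs => rw [← PySem.List.map_snd_enumerate groups 0]
      rw [List.flatMap_map]
      apply flatMap_congr_mem
      intro pg _
      rw [List.map_append]
      unfold A1B A2B gB
      by_cases hc : pg.2.2.contains n = true
      · have hc' : n ∈ pg.2.2 := List.contains_iff_mem.1 hc
        simp [hc']
      · have hc' : n ∉ pg.2.2 := fun hm => hc (List.contains_iff_mem.2 hm)
        by_cases hcp : pg.2.2.contains (p0A n) = true
        · have hcp' : p0A n ∈ pg.2.2 := List.contains_iff_mem.1 hcp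
          simp [hc', hcp', Ne.symm hcond]
        · have hcp' : p0A n ∉ pg.2.2 := fun hm => hcp (List.contains_iff_mem.2 hm)
          simp [hc', hcp']
    have hm_nil : ((PySem.List.enumerate groups).flatMap (fun pg => A1B n pg ++ A2B n pg)) = []
        ↔ EB n h (p0A n) (plA n) (extA n) groups = [] := by
      rw [← hmapPair, List.map_eq_nil_iff]
    by_cases hT : ((PySem.List.enumerate groups).flatMap (fun pg => A1B n pg ++ A2B n pg)) = []
    · rw [if_pos (by rw [hT]; rfl), if_pos (hm_nil.1 hT)]
      rfl
    · rw [if_neg (fun hi => hT (List.isEmpty_iff.1 hi)), if_neg (fun hE => hT (hm_nil.2 hE))]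
      rw [← hmapPair, List.foldl_map]
      rfl
  · rw [if_neg hcond]
    have hpe : plA n = p0A n := (of_not_not hcond).symm
    rw [List.append_nil, hexact]
    have hmem1 : ∀ x : Int × String × List String, ∀ e ∈ A1B n x, e.1 = x.1 := by
      intro pg e he
      unfold A1B at he
      by_cases hc : pg.2.2.contains n = true
      · rw [if_pos hc] at he
        have : e = (pg.1, pg.2.1) := by simpa using he
        rw [this]
      · rw [if_neg hc] at he
        exact absurd he (List.not_mem_nil)
    have hlen1' : ∀ x : Int × String × List String, (A1B n x).length ≤ 1 := by
      intro pg
      unfold A1B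
      by_cases hc : pg.2.2.contains n = true
      · have hc' : n ∈ pg.2.2 := List.contains_iff_mem.1 hc
        simp [hc']
      · have hc' : n ∉ pg.2.2 := fun hm => hc (List.contains_iff_mem.2 hm)
        simp [hc']
    have hpairT1 : ((PySem.List.enumerate groups).flatMap (A1B n)).Pairwise
        (fun a b => a.1 < b.1) :=
      pairwise_flatMap _ _ (fun pg : Int × String × List String => pg.1)
        (fun e : Int × String => e.1)
        (PySem.List.pairwise_lt_enumerate groups 0) hmem1 hlen1'
    have hsorted : PySem.List.sorted ((PySem.List.enumerate groups).flatMap (A1B n))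
        (fun e => e.1) false = (PySem.List.enumerate groups).flatMap (A1B n) :=
      PySem.List.sorted_eq_of_perm_of_pairwise_lt _ _ _ (List.Perm.refl _) hpairT1
    rw [hsorted]
    have hmapPair : ((PySem.List.enumerate groups).flatMap (A1B n)).map
        (fun e => (e.2, h)) = EB n h (p0A n) (plA n) (extA n) groups := by
      rw [List.map_flatMap]
      unfold EB
      conv_rhs => rw [← PySem.List.map_snd_enumerate groups 0]
      rw [List.flatMap_map]
      apply flatMap_congr_mem
      intro pg _
      unfold A1B gB
      by_cases hc : pg.2.2.contains n = true
      · have hc' : n ∈ pg.2.2 := List.contains_iff_mem.1 hc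
        simp [hc']
      · have hc' : n ∉ pg.2.2 := fun hm => hc (List.contains_iff_mem.2 hm)
        simp [hc', hpe]
    have hm_nil : ((PySem.List.enumerate groups).flatMap (A1B n)) = []
        ↔ EB n h (p0A n) (plA n) (extA n) groups = [] := by
      rw [← hmapPair, List.map_eq_nil_iff]
    by_cases hT : ((PySem.List.enumerate groups).flatMap (A1B n)) = []
    · rw [if_pos (by rw [hT]; rfl), if_pos (hm_nil.1 hT)]
      rfl
    · rw [if_neg (fun hi => hT (List.isEmpty_iff.1 hi)), if_neg (fun hE => hT (hm_nil.2 hE))]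
      rw [← hmapPair, List.foldl_map]
      rfl

theorem getD_foldl_insertAdd (l : List (String × Int)) :
    ∀ (d : PySem.Dict String Int) (k : String),
      (l.foldl insertAdd d).getD k 0 =
        d.getD k 0 + ((l.filter (fun p => p.1 == k)).map (·.2)).sum := by
  induction l with
  | nil => intro d k; simp
  | cons p t ih =>
    intro d k
    rw [List.foldl_cons, ih]
    unfold insertAdd
    rw [PySem.Dict.getD_insert]
    by_cases hk : k = p.1
    · rw [if_pos hk, List.filter_cons_of_pos (by simpa using hk.symm)]
      subst hk; simp [add_assoc]
    · rw [if_neg hk, List.filter_cons_of_neg (by simpa using fun h => hk h.symm)]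

theorem B_items (histos : List (String × Int)) (groups : List (String × List String)) :
    group_samples_datacard_alt histos groups =
      (PySem.Set.ofList ((histos.flatMap (histPairsB groups)).map (·.1))).map
        (fun k => (k, (((histos.flatMap (histPairsB groups)).filter (fun p => p.1 == k)).map (·.2)).sum)) := by
  unfold group_samples_datacard_alt
  rw [PySem.List.foldl_congr_mem histos (stepHistoB (buildIndexB groups))
      (fun d nh => (histPairsB groups nh).foldl insertAdd d) PySem.Dict.empty
      (fun d nh _ => stepHistoB_eq groups d nh),
    foldl_op_flatMap]
  have hkeys : ((histos.flatMap (histPairsB groups)).foldl insertAdd PySem.Dict.empty).keys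
      = PySem.Set.ofList ((histos.flatMap (histPairsB groups)).map (·.1)) := by
    unfold insertAdd
    rw [PySem.Dict.keys_foldl_insert_key (histos.flatMap (histPairsB groups))
        (fun p : String × Int => p.1)
        (fun (d : PySem.Dict String Int) (p : String × Int) => d.getD p.1 0 + p.2)
        PySem.Dict.empty,
      PySem.Dict.keys_empty, PySem.Set.update_nil_left]
  have hnodup : ((histos.flatMap (histPairsB groups)).foldl insertAdd PySem.Dict.empty).keys.Nodup := by
    unfold insertAdd
    exact PySem.Dict.nodup_keys_foldl_insert_key (histos.flatMap (histPairsB groups))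
      (fun p : String × Int => p.1)
      (fun (d : PySem.Dict String Int) (p : String × Int) => d.getD p.1 0 + p.2)
      PySem.Dict.empty (by rw [PySem.Dict.keys_empty]; exact List.nodup_nil)
  rw [PySem.Dict.items_eq_map_keys _ hnodup 0, hkeys]
  apply List.map_congr_left
  intro k _
  dsimp only
  rw [getD_foldl_insertAdd, PySem.Dict.getD_empty, zero_add]

-- ---- correspondence between the two schedules ----

theorem filter_beq_eq_nil_iff (cs : List String) (x : String) :
    cs.filter (· == x) = [] ↔ cs.contains x = false := by
  rw [List.filter_eq_nil_iff]
  constructor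
  · intro hall
    cases hb : cs.contains x with
    | false => rfl
    | true => exact absurd (by simp) (hall x (List.contains_iff_mem.1 hb))
  · intro hnc a ha hbeq
    have : a = x := by simpa using hbeq
    subst this
    rw [List.contains_iff_mem.2 ha] at hnc
    exact Bool.noConfusion hnc

theorem gA_nil_iff (n : String) (h : Int) (p0 pl ext : String) (g : String × List String) :
    gA n h p0 pl ext g = [] ↔ gB n h p0 pl ext g = [] := by
  unfold gA gB
  by_cases hc : g.2.contains n = true
  · rw [if_pos hc, if_pos hc]
  · rw [if_neg hc, if_neg hc, filter_qA]
    by_cases hpl : (pl == p0) = true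
    · have hb : (!(pl == p0)) = false := by simp [hpl]
      rw [if_pos hpl, hb]
      simp
    · have hb : (!(pl == p0)) = true := by simp [hpl]
      rw [if_neg hpl, hb, Bool.true_and]
      by_cases hp0 : g.2.contains p0 = true
      · rw [if_pos hp0]
        apply iff_of_false
        · have hm : p0 ∈ g.2.filter (· == p0) :=
            List.mem_filter.2 ⟨List.contains_iff_mem.1 hp0, by simp⟩
          simp only [ne_eq, List.map_eq_nil_iff]
          exact fun he => by rw [he] at hm; exact List.not_mem_nil hm
        · simp
      · rw [if_neg hp0]
        apply iff_of_true
        · rw [(filter_beq_eq_nil_iff g.2 p0).2 (by simpa using hp0)]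
          rfl
        · rfl

theorem EA_nil_iff (n : String) (h : Int) (p0 pl ext : String) (groups : List (String × List String)) :
    EA n h p0 pl ext groups = [] ↔ EB n h p0 pl ext groups = [] := by
  unfold EA EB
  rw [List.flatMap_eq_nil_iff, List.flatMap_eq_nil_iff]
  exact ⟨fun H x hx => (gA_nil_iff n h p0 pl ext x).1 (H x hx),
         fun H x hx => (gA_nil_iff n h p0 pl ext x).2 (H x hx)⟩

theorem set_add_add_self (s : PySem.Set String) (x : String) :
    PySem.Set.add (PySem.Set.add s x) x = PySem.Set.add s x := by
  have hm : x ∈ PySem.Set.add s x := (PySem.Set.mem_add s x x).2 (Or.inr rfl)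
  unfold PySem.Set.add PySem.Set.contains
  rw [if_pos (List.contains_iff_mem.2 (by simpa [PySem.Set.add, PySem.Set.contains] using hm))]

theorem foldl_add_replicate (m : Nat) (k : String) :
    ∀ acc : PySem.Set String,
      (List.replicate m k).foldl PySem.Set.add acc = if m = 0 then acc else PySem.Set.add acc k := by
  induction m with
  | zero => intro acc; simp
  | succ m ih =>
    intro acc
    rw [List.replicate_succ, List.foldl_cons, ih]
    by_cases hm : m = 0
    · simp [hm]
    · rw [if_neg hm, if_neg (Nat.succ_ne_zero m), set_add_add_self]

theorem keys_piece (n : String) (h : Int) (p0 pl ext : String) (g : String × List String) :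
    ∀ acc : PySem.Set String,
      ((gA n h p0 pl ext g).map (·.1)).foldl PySem.Set.add acc =
      ((gB n h p0 pl ext g).map (·.1)).foldl PySem.Set.add acc := by
  intro acc
  unfold gA gB
  by_cases hc : g.2.contains n = true
  · rw [if_pos hc, if_pos hc]
  · rw [if_neg hc, if_neg hc, filter_qA, List.map_map]
    by_cases hpl : (pl == p0) = true
    · have hb : (!(pl == p0)) = false := by simp [hpl]
      rw [if_pos hpl, hb]
      rfl
    · have hb : (!(pl == p0)) = true := by simp [hpl]
      rw [if_neg hpl, hb, Bool.true_and]
      have hrep : (g.2.filter (· == p0)).map ((·.1) ∘ (fun _ => (g.1 ++ "__" ++ ext, h)))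
          = List.replicate (g.2.filter (· == p0)).length (g.1 ++ "__" ++ ext) := by
        dsimp only [Function.comp_def]
        exact List.map_const'
      rw [hrep, foldl_add_replicate]
      by_cases hp0 : g.2.contains p0 = true
      · rw [if_pos hp0]
        rw [if_neg ?_]
        · rfl
        · simp only [List.length_eq_zero_iff]
          intro he
          have hm : p0 ∈ g.2.filter (· == p0) :=
            List.mem_filter.2 ⟨List.contains_iff_mem.1 hp0, by simp⟩
          rw [he] at hm
          exact List.not_mem_nil hm
      · rw [if_neg hp0]
        rw [if_pos ?_]
        · rfl
        · simp only [List.length_eq_zero_iff]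
          exact (filter_beq_eq_nil_iff g.2 p0).2 (by simpa using hp0)

theorem keys_flat {α : Type} (l : List α) (f g : α → List (String × Int))
    (hp : ∀ x ∈ l, ∀ acc : PySem.Set String,
      ((f x).map (·.1)).foldl PySem.Set.add acc = ((g x).map (·.1)).foldl PySem.Set.add acc) :
    ∀ acc : PySem.Set String,
      ((l.flatMap f).map (·.1)).foldl PySem.Set.add acc =
      ((l.flatMap g).map (·.1)).foldl PySem.Set.add acc := by
  induction l with
  | nil => intro acc; rfl
  | cons a t ih =>
    intro acc
    simp only [List.flatMap_cons, List.map_append, List.foldl_append]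
    rw [hp a (List.mem_cons_self), ih (fun x hx => hp x (List.mem_cons_of_mem a hx))]

theorem keys_hist (groups : List (String × List String)) (nh : String × Int) :
    ∀ acc : PySem.Set String,
      ((histPairsA groups nh).map (·.1)).foldl PySem.Set.add acc =
      ((histPairsB groups nh).map (·.1)).foldl PySem.Set.add acc := by
  intro acc
  unfold histPairsA histPairsB padA padB
  by_cases hE : EA nh.1 nh.2 (p0A nh.1) (plA nh.1) (extA nh.1) groups = []
  · rw [if_pos hE, if_pos ((EA_nil_iff _ _ _ _ _ _).1 hE)]
  · rw [if_neg hE, if_neg (fun hB => hE ((EA_nil_iff _ _ _ _ _ _).2 hB))]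
    unfold EA EB
    exact keys_flat groups _ _ (fun g _ => keys_piece nh.1 nh.2 _ _ _ g) acc

theorem keys_eq (histos : List (String × Int)) (groups : List (String × List String)) :
    PySem.Set.ofList ((histos.flatMap (histPairsA groups)).map (·.1)) =
    PySem.Set.ofList ((histos.flatMap (histPairsB groups)).map (·.1)) := by
  rw [PySem.Set.ofList_eq_foldl, PySem.Set.ofList_eq_foldl]
  exact keys_flat histos _ _ (fun nh _ => keys_hist groups nh) []

-- ---- discrepancy decomposition: A's sums equal B's sums plus dAt ----

def sumsK (l : List (String × Int)) (k : String) : Int :=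
  ((l.filter (fun p => p.1 == k)).map (·.2)).sum

theorem sumsK_append (l l' : List (String × Int)) (k : String) :
    sumsK (l ++ l') k = sumsK l k + sumsK l' k := by
  simp [sumsK, List.filter_append]

theorem sumsK_flatMap {α : Type} (l : List α) (f : α → List (String × Int)) (k : String) :
    sumsK (l.flatMap f) k = (l.map (fun x => sumsK (f x) k)).sum := by
  induction l with
  | nil => rfl
  | cons a t ih => rw [List.flatMap_cons, sumsK_append, List.map_cons, List.sum_cons, ih]

theorem sum_map_decomp {α : Type} (l : List α) (f g h : α → Int)
    (hp : ∀ x ∈ l, f x = g x + h x) :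
    (l.map f).sum = (l.map g).sum + (l.map h).sum := by
  induction l with
  | nil => simp
  | cons a t ih =>
    simp only [List.map_cons, List.sum_cons]
    rw [hp a (List.mem_cons_self), ih (fun x hx => hp x (List.mem_cons_of_mem a hx))]
    ring

theorem piece_decomp (n : String) (h : Int) (g : String × List String) (k : String) :
    sumsK (gA n h (p0A n) (plA n) (extA n) g) k =
      sumsK (gB n h (p0A n) (plA n) (extA n) g) k + dPair (n, h) g k := by
  unfold gA gB dPair sumsK
  dsimp only
  by_cases hc : g.2.contains n = true
  · rw [if_pos hc, if_pos hc, if_neg (by rw [hc]; simp)]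
    ring
  · have hcf : g.2.contains n = false := by revert hc; cases g.2.contains n <;> simp
    rw [if_neg hc, if_neg hc, hcf, filter_qA]
    by_cases hpl : (plA n == p0A n) = true
    · rw [if_pos hpl, hpl]
      simp
    · have hplf : (plA n == p0A n) = false := by revert hpl; cases (plA n == p0A n) <;> simp
      rw [if_neg hpl, hplf]
      have hlen : (g.2.filter (· == p0A n)).length = g.2.count (p0A n) := by
        rw [List.count_eq_countP, List.countP_eq_length_filter]
      by_cases hp0 : g.2.contains (p0A n) = true
      · have hcnt1 : 1 ≤ g.2.count (p0A n) := by
          have := List.count_pos_iff.2 (List.contains_iff_mem.1 hp0)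
          omega
        rw [hp0]
        by_cases hk : ((g.1 ++ "__" ++ extA n) == k) = true
        · have hke : g.1 ++ "__" ++ extA n = k := by simpa using hk
          rw [hk]
          simp only [List.map_const', List.filter_replicate, hke, beq_self_eq_true, if_true,
            Bool.not_false, Bool.true_and, Bool.and_self, List.filter_cons_of_pos,
            List.map_replicate, List.sum_replicate, List.filter_nil, List.map_cons,
            List.map_nil, List.sum_cons, List.sum_nil, hlen, nsmul_eq_mul]
          have hmax : max ((g.2.count (p0A n) : Int) - 1) 0 = (g.2.count (p0A n) : Int) - 1 := by
            omega
          rw [hmax]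
          simp
          ring
        · have hkf : ((g.1 ++ "__" ++ extA n) == k) = false := by
            revert hk; cases ((g.1 ++ "__" ++ extA n) == k) <;> simp
          have hkne : ¬ (g.1 ++ "__" ++ extA n = k) := by simpa using hkf
          rw [hkf]
          simp [List.map_const', List.filter_replicate, hkne]
      · have hp0f : g.2.contains (p0A n) = false := by
          revert hp0; cases g.2.contains (p0A n) <;> simp
        have hnil : g.2.filter (· == p0A n) = [] := (filter_beq_eq_nil_iff g.2 (p0A n)).2 hp0f
        rw [hp0f, hnil]
        simp
theorem dPair_zero_of_gA_nil (n : String) (h : Int) (g : String × List String) (k : String)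
    (hnil : gA n h (p0A n) (plA n) (extA n) g = []) : dPair (n, h) g k = 0 := by
  have hpd := piece_decomp n h g k
  rw [hnil, (gA_nil_iff n h (p0A n) (plA n) (extA n) g).1 hnil] at hpd
  simpa [sumsK] using hpd.symm

theorem hist_decomp (groups : List (String × List String)) (nh : String × Int) (k : String) :
    sumsK (histPairsA groups nh) k =
      sumsK (histPairsB groups nh) k + (groups.map (fun g => dPair nh g k)).sum := by
  obtain ⟨n, h⟩ := nh
  unfold histPairsA histPairsB padA padB
  dsimp only
  by_cases hE : EA n h (p0A n) (plA n) (extA n) groups = []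
  · rw [if_pos hE, if_pos ((EA_nil_iff _ _ _ _ _ _).1 hE)]
    have hz : (groups.map (fun g => dPair (n, h) g k)).sum = 0 := by
      apply List.sum_eq_zero
      intro x hx
      obtain ⟨g, hg, rfl⟩ := List.mem_map.1 hx
      exact dPair_zero_of_gA_nil n h g k (List.flatMap_eq_nil_iff.1 hE g hg)
    rw [hz, add_zero]
  · rw [if_neg hE, if_neg (fun hB => hE ((EA_nil_iff _ _ _ _ _ _).2 hB))]
    unfold EA EB
    rw [sumsK_flatMap, sumsK_flatMap]
    exact sum_map_decomp groups _ _ _ (fun g _ => piece_decomp n h g k)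

theorem total_decomp (histos : List (String × Int)) (groups : List (String × List String)) (k : String) :
    sumsK (histos.flatMap (histPairsA groups)) k =
      sumsK (histos.flatMap (histPairsB groups)) k + dAt histos groups k := by
  rw [sumsK_flatMap, sumsK_flatMap]
  exact sum_map_decomp histos _ _ _ (fun nh _ => hist_decomp groups nh k)

theorem dPair_key (nh : String × Int) (g : String × List String) (k : String)
    (hne : dPair nh g k ≠ 0) :
    g.2.contains nh.1 = false ∧ (plA nh.1 == p0A nh.1) = false ∧
    g.2.contains (p0A nh.1) = true ∧ g.1 ++ "__" ++ extA nh.1 = k := by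
  unfold dPair at hne
  by_cases hcond : (!(g.2.contains nh.1) && (g.1 ++ "__" ++ extA nh.1 == k)) = true
  · rw [if_pos hcond] at hne
    simp only [Bool.and_eq_true, Bool.not_eq_true'] at hcond
    have hlen2 : 2 ≤ (g.2.filter (qA (p0A nh.1) (plA nh.1))).length := by
      by_contra hl
      apply hne
      have hmax0 : max (((g.2.filter (qA (p0A nh.1) (plA nh.1))).length : Int) - 1) 0 = 0 := by
        omega
      rw [hmax0, zero_mul]
    have hne2 : g.2.filter (qA (p0A nh.1) (plA nh.1)) ≠ [] := by
      intro he; rw [he] at hlen2; simp at hlen2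
    by_cases hpl : (plA nh.1 == p0A nh.1) = true
    · rw [filter_qA, if_pos hpl] at hne2
      exact absurd rfl hne2
    · have hplf : (plA nh.1 == p0A nh.1) = false := by
        revert hpl; cases (plA nh.1 == p0A nh.1) <;> simp
      rw [filter_qA, if_neg hpl] at hne2
      obtain ⟨a, ha⟩ := List.exists_mem_of_ne_nil _ hne2
      have hmf := List.mem_filter.1 ha
      have hap : a = p0A nh.1 := by simpa using hmf.2
      exact ⟨hcond.1, hplf, List.contains_iff_mem.2 (hap ▸ hmf.1), by simpa using hcond.2⟩
  · rw [if_neg hcond] at hne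
    exact absurd rfl hne
theorem key_in_keys (histos : List (String × Int)) (groups : List (String × List String))
    (nh : String × Int) (g : String × List String) (k : String)
    (hnh : nh ∈ histos) (hg : g ∈ groups) (hne : dPair nh g k ≠ 0) :
    k ∈ PySem.Set.ofList ((histos.flatMap (histPairsA groups)).map (·.1)) := by
  obtain ⟨hc, hpl, hp0, hkey⟩ := dPair_key nh g k hne
  have hqA : qA (p0A nh.1) (plA nh.1) (p0A nh.1) = true := by
    unfold qA
    rw [beq_self_eq_true, hpl]
    rfl
  have hmemf : p0A nh.1 ∈ g.2.filter (qA (p0A nh.1) (plA nh.1)) :=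
    List.mem_filter.2 ⟨List.contains_iff_mem.1 hp0, hqA⟩
  have hpair : (k, nh.2) ∈ gA nh.1 nh.2 (p0A nh.1) (plA nh.1) (extA nh.1) g := by
    unfold gA
    rw [if_neg (by rw [hc]; simp)]
    exact List.mem_map.2 ⟨p0A nh.1, hmemf, by rw [hkey]⟩
  have hEA : (k, nh.2) ∈ EA nh.1 nh.2 (p0A nh.1) (plA nh.1) (extA nh.1) groups :=
    List.mem_flatMap.2 ⟨g, hg, hpair⟩
  have hEAne : EA nh.1 nh.2 (p0A nh.1) (plA nh.1) (extA nh.1) groups ≠ [] := by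
    intro he; rw [he] at hEA; exact List.not_mem_nil hEA
  have hhp : (k, nh.2) ∈ histPairsA groups nh := by
    unfold histPairsA padA
    rw [if_neg hEAne]
    exact hEA
  exact (PySem.Set.mem_ofList _ _).2
    (List.mem_map.2 ⟨(k, nh.2), List.mem_flatMap.2 ⟨nh, hnh, hhp⟩, rfl⟩)

theorem dAt_exists (histos : List (String × Int)) (groups : List (String × List String)) (k : String)
    (h : dAt histos groups k ≠ 0) : ∃ nh ∈ histos, ∃ g ∈ groups, dPair nh g k ≠ 0 := by
  by_contra h'
  push_neg at h'
  apply h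
  unfold dAt
  apply List.sum_eq_zero
  intro x hx
  obtain ⟨nh, hnh, rfl⟩ := List.mem_map.1 hx
  apply List.sum_eq_zero
  intro y hy
  obtain ⟨g, hg, rfl⟩ := List.mem_map.1 hy
  exact h' nh hnh g hg

theorem dAmt_eq (nh : String × Int) (g : String × List String) :
    dAmt nh g = dPair nh g (g.1 ++ "__" ++ extA nh.1) := by
  unfold dAmt dPair
  rw [show dP nh.1 0 = p0A nh.1 from dP_eq nh.1 0,
    show dP nh.1 (-1) = plA nh.1 from dP_eq nh.1 (-1),
    beq_self_eq_true, Bool.and_true]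
  by_cases hc : g.2.contains nh.1 = true
  · rw [hc]
    simp
  · have hcf : g.2.contains nh.1 = false := by revert hc; cases g.2.contains nh.1 <;> simp
    rw [hcf, Bool.false_or, filter_qA]
    by_cases hpl : (plA nh.1 == p0A nh.1) = true
    · rw [hpl, if_pos (show true = true from rfl), if_pos (show true = true from rfl),
        if_pos (show (!false) = true from rfl)]
      simp
    · have hplf : (plA nh.1 == p0A nh.1) = false := by
        revert hpl; cases (plA nh.1 == p0A nh.1) <;> simp
      rw [hplf, if_neg (show ¬(false = true) from by simp),
        if_neg (show ¬(false = true) from by simp),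
        if_pos (show (!false) = true from rfl)]
      have hlen : (g.2.filter (· == p0A nh.1)).length = g.2.count (p0A nh.1) := by
        rw [List.count_eq_countP, List.countP_eq_length_filter]
      rw [hlen]
      have hcast : ((g.2.count (p0A nh.1) - 1 : Nat) : Int)
          = max ((g.2.count (p0A nh.1) : Int) - 1) 0 := by omega
      rw [hcast]

theorem dPair_via_amt (nh : String × Int) (g : String × List String) (k : String) :
    dPair nh g k = if (g.1 ++ "__" ++ extA nh.1) == k then dAmt nh g else 0 := by
  rw [dAmt_eq]
  by_cases hk : ((g.1 ++ "__" ++ extA nh.1) == k) = true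
  · have hke : g.1 ++ "__" ++ extA nh.1 = k := by simpa using hk
    rw [if_pos hk, ← hke]
  · have hkf : ((g.1 ++ "__" ++ extA nh.1) == k) = false := by
      revert hk; cases ((g.1 ++ "__" ++ extA nh.1) == k) <;> simp
    rw [if_neg hk]
    unfold dPair
    rw [hkf, Bool.and_false, if_neg (show ¬(false = true) from by simp)]

theorem sumsK_pairs (nh : String × Int) (gs : List (String × List String)) (k : String) :
    sumsK (gs.map (fun g => (g.1 ++ "__" ++ extA nh.1, dAmt nh g))) k
      = (gs.map (fun g => dPair nh g k)).sum := by
  induction gs with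
  | nil => rfl
  | cons g t ih =>
    simp only [List.map_cons, List.sum_cons]
    unfold sumsK
    rw [List.filter_cons]
    by_cases hk : ((g.1 ++ "__" ++ extA nh.1) == k) = true
    · rw [if_pos (by simpa using hk)]
      simp only [List.map_cons, List.sum_cons]
      rw [dPair_via_amt, if_pos hk]
      unfold sumsK at ih
      rw [ih]
    · rw [if_neg (by simpa using hk), dPair_via_amt, if_neg hk, zero_add]
      unfold sumsK at ih
      rw [ih]

theorem sumsK_filter_nz (l : List (String × Int)) (k : String) :
    (((l.filter (fun p => p.2 != 0)).filter (fun q => q.1 == k)).map (·.2)).sum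
      = ((l.filter (fun q => q.1 == k)).map (·.2)).sum := by
  induction l with
  | nil => rfl
  | cons p t ih =>
    rw [List.filter_cons, List.filter_cons]
    by_cases hz : (p.2 != 0) = true
    · rw [if_pos hz, List.filter_cons]
      by_cases hk : (p.1 == k) = true
      · rw [if_pos hk, if_pos hk]
        simp only [List.map_cons, List.sum_cons]
        rw [ih]
      · rw [if_neg hk, if_neg hk]
        exact ih
    · rw [if_neg hz]
      by_cases hk : (p.1 == k) = true
      · rw [if_pos hk]
        simp only [List.map_cons, List.sum_cons]
        have hz0 : p.2 = 0 := by simpa using hz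
        rw [ih, hz0, zero_add]
      · rw [if_neg hk]
        exact ih

theorem D_iff (histos : List (String × Int)) (groups : List (String × List String)) :
    D_group_samples_datacard histos groups ↔
      ∃ nh ∈ histos, ∃ g ∈ groups, dAt histos groups (g.1 ++ "__" ++ extA nh.1) ≠ 0 := by
  unfold D_group_samples_datacard
  simp only [show ∀ n, dP n 1 = extA n from fun n => dP_eq n 1]
  have hsum : ∀ k, (((histos.flatMap (fun nh =>
        groups.map (fun g => (g.1 ++ "__" ++ extA nh.1, dAmt nh g)))).filter
        (fun q => q.1 == k)).map (·.2)).sum = dAt histos groups k := by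
    intro k
    have h1 : (((histos.flatMap (fun nh =>
          groups.map (fun g => (g.1 ++ "__" ++ extA nh.1, dAmt nh g)))).filter
          (fun q => q.1 == k)).map (·.2)).sum
        = sumsK (histos.flatMap (fun nh =>
            groups.map (fun g => (g.1 ++ "__" ++ extA nh.1, dAmt nh g)))) k := rfl
    rw [h1, sumsK_flatMap]
    unfold dAt
    exact congrArg List.sum (List.map_congr_left (fun nh _ => sumsK_pairs nh groups k))
  constructor
  · rintro ⟨p, hp, hne⟩
    have hp' := List.mem_filter.1 hp
    obtain ⟨nh, hnh, hmem⟩ := List.mem_flatMap.1 hp'.1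
    obtain ⟨g, hg, hpg⟩ := List.mem_map.1 hmem
    refine ⟨nh, hnh, g, hg, ?_⟩
    have hkey : g.1 ++ "__" ++ extA nh.1 = p.1 := by rw [← hpg]
    rw [hkey, ← hsum p.1]
    rw [sumsK_filter_nz] at hne
    exact hne
  · rintro ⟨nh, hnh, g, hg, hda⟩
    obtain ⟨nh', hnh', g', hg', hdp'⟩ := dAt_exists histos groups _ hda
    have hcond := dPair_key nh' g' _ hdp'
    have hamt : dAmt nh' g' ≠ 0 := by
      rw [dPair_via_amt] at hdp'
      by_cases hck : ((g'.1 ++ "__" ++ extA nh'.1) == (g.1 ++ "__" ++ extA nh.1)) = true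
      · rw [if_pos hck] at hdp'
        exact hdp'
      · rw [if_neg hck] at hdp'
        exact absurd rfl hdp'
    refine ⟨(g'.1 ++ "__" ++ extA nh'.1, dAmt nh' g'), ?_, ?_⟩
    · apply List.mem_filter.2
      refine ⟨List.mem_flatMap.2 ⟨nh', hnh', List.mem_map.2 ⟨g', hg', rfl⟩⟩, by simpa using hamt⟩
    · dsimp only
      rw [sumsK_filter_nz, hsum, hcond.2.2.2]
      exact hda

theorem filter_ne_nil_of_mem_keys (PA : List (String × Int)) (k : String)
    (hk : k ∈ PySem.Set.ofList (PA.map (·.1))) :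
    (PA.filter (fun p => p.1 == k)).map (·.2) ≠ [] := by
  rw [PySem.Set.mem_ofList] at hk
  obtain ⟨p, hp, hpk⟩ := List.mem_map.1 hk
  have : p ∈ PA.filter (fun p => p.1 == k) := by
    rw [List.mem_filter]; exact ⟨hp, by simpa using hpk⟩
  simp only [ne_eq, List.map_eq_nil_iff]
  exact fun he => by rw [he] at this; exact List.not_mem_nil this

-- ===== VERDICT (by name: the statements are the Claim_ definitions above) =====
theorem group_samples_datacard_spec : Claim_unchanged_group_samples_datacard := by
  intro histos groups _ _
  unfold Spec_group_samples_datacard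
  intro hnd
  rw [A_items, B_items, keys_eq]
  apply List.map_congr_left
  intro k hk
  have hk' : k ∈ PySem.Set.ofList ((histos.flatMap (histPairsA groups)).map (·.1)) := by
    rw [keys_eq]; exact hk
  rw [sumA_eq_sum _ (filter_ne_nil_of_mem_keys _ _ hk')]
  have hdec := total_decomp histos groups k
  unfold sumsK at hdec
  have hda : dAt histos groups k = 0 := by
    by_contra hda
    obtain ⟨nh, hnh, g, hg, hdp⟩ := dAt_exists histos groups k hda
    obtain ⟨_, _, _, hkey⟩ := dPair_key nh g k hdp
    apply hnd
    refine (D_iff histos groups).2 ⟨nh, hnh, g, hg, ?_⟩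
    rw [hkey]
    exact hda
  rw [hda, add_zero] at hdec
  rw [hdec]

theorem group_samples_datacard_changed : Claim_changed_group_samples_datacard := by
  unfold Claim_changed_group_samples_datacard
  decide

theorem group_samples_datacard_tight : Claim_exact_group_samples_datacard := by
  intro histos groups _ _ hD heq
  obtain ⟨nh, hnh, g, hg, hda⟩ := (D_iff histos groups).1 hD
  obtain ⟨nh', hnh', g', hg', hdp'⟩ := dAt_exists histos groups _ hda
  have hkmem := key_in_keys histos groups nh' g' _ hnh' hg' hdp'
  rw [A_items, B_items, keys_eq] at heq
  have hent := List.map_inj_left.1 heq (g.1 ++ "__" ++ extA nh.1) (by rw [← keys_eq]; exact hkmem)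
  have hval := congrArg Prod.snd hent
  dsimp only at hval
  rw [sumA_eq_sum _ (filter_ne_nil_of_mem_keys _ _ hkmem)] at hval
  have hdec := total_decomp histos groups (g.1 ++ "__" ++ extA nh.1)
  unfold sumsK at hdec
  rw [hval] at hdec
  omega
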